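-- pv_equiv track=rewrite | github.com/dplocki/advent-of-code | 2017_01.py | solve_captcha
-- ===== SOURCE A (Python) =====
-- def solve_captcha(input, step):
--     result = 0
--     lenght = len(input)
--
--     for index, digit in enumerate(input):
--         prev = input[(index + step) % lenght]
--
--         if digit == prev:
--             result += int(digit)
--
--     return result
-- ===== SOURCE B (Python) =====
-- def solve_captcha(input, step):
--     n = len(input)
--     if n == 0:
--         return 0
--     s = step % n
--     # Euclid's algorithm: the map i -> (i + s) % n splits the indices into
--     # gcd(n, s) cycles of length n // gcd(n, s) each.
--     a, b = n, s
--     while b: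
--         a, b = b, a % b
--     g = a
--     total = 0
--     # walk each cycle once, comparing consecutive elements along the walk
--     for r in range(g):
--         j = r
--         for _ in range(n // g):
--             nxt = (j + s) % n
--             if input[j] == input[nxt]:
--                 total += int(input[j])
--             j = nxt
--     return total
-- ===== Notes on version B (the rewrite author's own statement) =====
-- stated objective: alternative
-- what changed: B decomposes the index set into the gcd(n, step % n) cycles of the permutation i -> (i + step) % n (gcd by an explicit Euclid loop) and walks each cycle once, accumulating matches between consecutive elements of the walk, instead of A's flat left-to-right scan with a modular lookup at every index; equal because the cycle walks visit every index exactly once.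
import Mathlib
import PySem

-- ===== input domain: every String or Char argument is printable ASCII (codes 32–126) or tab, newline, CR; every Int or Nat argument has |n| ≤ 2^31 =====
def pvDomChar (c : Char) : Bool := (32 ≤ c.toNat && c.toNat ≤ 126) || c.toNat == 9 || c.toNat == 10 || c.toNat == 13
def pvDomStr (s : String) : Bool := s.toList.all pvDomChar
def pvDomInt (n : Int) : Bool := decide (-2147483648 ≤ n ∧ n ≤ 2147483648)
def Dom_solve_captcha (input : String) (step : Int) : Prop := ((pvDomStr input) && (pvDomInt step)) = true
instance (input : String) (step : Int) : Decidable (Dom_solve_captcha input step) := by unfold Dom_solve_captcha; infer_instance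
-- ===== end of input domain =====

-- B replaces A's flat scan (one modular lookup per index) by a cycle decomposition of the
-- map i ↦ (i + step) % n: it walks each of the gcd(n, step % n) cycles once and accumulates
-- matches between consecutive elements of the walk (alternative algorithm; same cost).

-- ===== PORT A =====
-- A: for each index, look the partner digit up at (index + step) % len(input) and add int(digit) on a match.
def solve_captcha (input : String) (step : Int) : Int :=
  let chars := input.toList
  let lenght : Int := (chars.length : Int)
  (PySem.List.enumerate chars).foldl
    (fun result p =>
      let prev := PySem.List.pyGet? chars (PySem.Int.mod (p.1 + step) lenght)
      if prev = some p.2 then result + (PySem.Int.ofChars? [p.2]).getD 0 else result)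
    0

-- ===== PORT B =====
-- Source B's Euclid while-loop ('while b: a, b = b, a % b' then 'g = a'), step for step.
def pvGcdLoop : Nat → Nat → Nat
  | a, 0 => a
  | a, b + 1 => pvGcdLoop (b + 1) (a % (b + 1))
  termination_by _ b => b
  decreasing_by exact Nat.lt_succ_of_le (Nat.le_of_lt_succ (Nat.mod_lt _ (Nat.succ_pos b)))

-- B: s = step % n, g = Euclid(n, s); walk each of the g cycles of length n // g,
-- comparing each visited index with the next one in the walk.  Every index the Python
-- manipulates is a nonnegative int < n, so the Nat loop state is exact (the lookups
-- themselves stay PySem.List.pyGet?).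
def solve_captcha_alt (input : String) (step : Int) : Int :=
  let chars := input.toList
  let n := chars.length
  if n = 0 then 0
  else
    let s := (PySem.Int.mod step (n : Int)).toNat   -- step % n, nonnegative since n > 0
    let g := pvGcdLoop n s
    (List.range g).foldl
      (fun total r =>
        ((List.range (n / g)).foldl
          (fun (st : Nat × Int) _ =>
            let j := st.1
            let nxt := (j + s) % n
            (nxt,
              if PySem.List.pyGet? chars (j : Int) = PySem.List.pyGet? chars (nxt : Int) then
                st.2 + (PySem.Int.ofChars? [(PySem.List.pyGet? chars (j : Int)).getD ' ']).getD 0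
              else st.2))
          (r, total)).2)
      0

-- ===== PRECONDITION & SPEC =====
-- Pre_ excludes exactly the inputs on which Python A raises ValueError: those where some
-- position matches its partner (step ahead, circularly) but holds a non-digit character,
-- so that int(digit) fails.  A returns on every other input (and so does B).
def Pre_solve_captcha (input : String) (step : Int) : Prop :=
  ∀ i < input.toList.length,
    input.toList.getD i ' ' =
        input.toList.getD ((((i : Int) + step) % (input.toList.length : Int)).toNat) ' ' →
      (input.toList.getD i ' ').isDigit
instance (input : String) (step : Int) : Decidable (Pre_solve_captcha input step) := by
  unfold Pre_solve_captcha; infer_instance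
def pvWitness_solve_captcha : String × Int := ("91212129", 1)

def Spec_solve_captcha (input : String) (step : Int) (out : Int) : Prop := out = solve_captcha_alt input step
instance (input : String) (step : Int) (out : Int) : Decidable (Spec_solve_captcha input step out) := by unfold Spec_solve_captcha; infer_instance

-- ===== CLAIM (what is proved, stated in full; the proofs are below) =====
def Claim_equal_solve_captcha : Prop := ∀ (input : String) (step : Int), Dom_solve_captcha input step → Pre_solve_captcha input step → Spec_solve_captcha input step (solve_captcha input step)

-- ===== LEMMAS AND PROOFS =====

-- the per-index contribution both programs accumulate (s is the reduced step)
def pvF (chars : List Char) (s i : Nat) : Int :=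
  if PySem.List.pyGet? chars (i : Int)
      = PySem.List.pyGet? chars (((i + s) % chars.length : Nat) : Int) then
    (PySem.Int.ofChars? [(PySem.List.pyGet? chars (i : Int)).getD ' ']).getD 0
  else 0

theorem pvGcdLoop_eq (a b : Nat) : pvGcdLoop a b = Nat.gcd a b := by
  induction a, b using pvGcdLoop.induct with
  | case1 a => simp [pvGcdLoop]
  | case2 a b ih =>
    rw [pvGcdLoop, ih, Nat.gcd_comm (b + 1) (a % (b + 1)), ← Nat.gcd_rec, Nat.gcd_comm]

-- conditional accumulation as a sum over a mapped list (the fold shape of port A)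
theorem pv_foldl_if_add {β : Type} (c : β → Prop) [DecidablePred c] (v : β → Int) (l : List β) (a : Int) :
    l.foldl (fun acc p => if c p then acc + v p else acc) a
      = a + (l.map (fun p => if c p then v p else 0)).sum := by
  induction l generalizing a with
  | nil => simp
  | cons x xs ih => by_cases h : c x <;> simp [h, ih, add_assoc]

-- a fold whose every step adds a value is the sum of those values (the outer fold of port B)
theorem pv_foldl_add_sum {α : Type} (l : List α) (h : α → Int) (f : Int → α → Int)
    (H : ∀ a x, x ∈ l → f a x = a + h x) : ∀ a, l.foldl f a = a + (l.map h).sum := by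
  induction l with
  | nil => simp
  | cons x xs ih =>
    intro a
    rw [List.foldl_cons, H a x List.mem_cons_self,
      ih (fun a y hy => H a y (List.mem_cons_of_mem x hy)), List.map_cons, List.sum_cons, add_assoc]

-- the pair (cycle number, position in cycle) is recoverable from the visited index
theorem pv_cycle_inj (n s r r' t t' : Nat) (hn : 0 < n)
    (hr : r < Nat.gcd n s) (hr' : r' < Nat.gcd n s)
    (ht : t < n / Nat.gcd n s) (ht' : t' < n / Nat.gcd n s)
    (h : (r + t * s) % n = (r' + t' * s) % n) : r = r' ∧ t = t' := by
  set g := Nat.gcd n s with hg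
  have hgn : g ∣ n := Nat.gcd_dvd_left n s
  have hgs : g ∣ s := Nat.gcd_dvd_right n s
  have hgpos : 0 < g := Nat.gcd_pos_of_pos_left _ hn
  obtain ⟨s', hs'⟩ := hgs
  have hrg : ∀ (r t : Nat), r < g → (r + t * s) % n % g = r := by
    intro r t hrlt
    rw [Nat.mod_mod_of_dvd _ hgn, hs', show r + t * (g * s') = r + g * (t * s') by ring,
      Nat.add_mul_mod_self_left, Nat.mod_eq_of_lt hrlt]
  have hrr : r = r' := by
    have h1 := hrg r t hr
    have h2 := hrg r' t' hr'
    rw [h] at h1; omega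
  subst hrr
  refine ⟨rfl, ?_⟩
  have hmod : Nat.ModEq n (t * s) (t' * s) := Nat.ModEq.add_left_cancel' r h
  have key : ∀ t t' : Nat, t ≤ t' → t' < n / g → Nat.ModEq n (t * s) (t' * s) → t = t' := by
    intro t t' hle ht' hm
    by_cases hs0 : s = 0
    · have : n / g = 1 := by
        rw [hg, hs0, Nat.gcd_zero_right, Nat.div_self hn]
      omega
    · have hdvd : n ∣ t' * s - t * s := (Nat.modEq_iff_dvd' (Nat.mul_le_mul_right s hle)).1 hm
      rw [← Nat.sub_mul] at hdvd
      have hn'g : g * (n / g) = n := Nat.mul_div_cancel' hgn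
      have hs'g : g * (s / g) = s := Nat.mul_div_cancel' ⟨s', hs'⟩
      have hco : Nat.Coprime (n / g) (s / g) := Nat.coprime_div_gcd_div_gcd hgpos
      have h2 : n / g ∣ (t' - t) * (s / g) := by
        have h1 : g * (n / g) ∣ g * ((t' - t) * (s / g)) := by
          rw [hn'g, show g * ((t' - t) * (s / g)) = (t' - t) * (g * (s / g)) by ring, hs'g]
          exact hdvd
        exact (Nat.mul_dvd_mul_iff_left hgpos).1 h1
      have h3 : n / g ∣ t' - t := hco.dvd_of_dvd_mul_right h2
      have h4 : t' - t = 0 :=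
        Nat.eq_zero_of_dvd_of_lt h3 (lt_of_le_of_lt (Nat.sub_le t' t) ht')
      omega
  rcases le_total t t' with hle | hle
  · exact key t t' hle ht' hmod
  · exact (key t' t hle ht hmod.symm).symm

-- the cycle walks visit every index of range n exactly once
theorem pv_visit_perm (n s : Nat) (hn : 0 < n) :
    ((List.range (Nat.gcd n s)).flatMap
      (fun r => (List.range (n / Nat.gcd n s)).map (fun t => (r + t * s) % n))).Perm
      (List.range n) := by
  set g := Nat.gcd n s with hg
  set L := (List.range g).flatMap
      (fun r => (List.range (n / g)).map (fun t => (r + t * s) % n)) with hL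
  have hgn : g ∣ n := Nat.gcd_dvd_left n s
  have hlen : L.length = n := by
    rw [hL, List.length_flatMap]
    simp only [List.length_map, List.length_range]
    rw [List.map_const', List.sum_replicate, smul_eq_mul, List.length_range,
      Nat.mul_div_cancel' hgn]
  have hnodup : L.Nodup := by
    rw [hL]
    refine List.nodup_flatMap.2 ⟨?_, ?_⟩
    · intro r hr
      refine (List.nodup_range).map_on ?_
      intro t ht t' ht' hEq
      exact (pv_cycle_inj n s r r t t' hn (List.mem_range.1 hr) (List.mem_range.1 hr)
        (List.mem_range.1 ht) (List.mem_range.1 ht') hEq).2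
    · refine List.pairwise_iff_forall_sublist.mpr ?_
      intro r r' hs'
      have hr : r < g := List.mem_range.1 (hs'.subset (show r ∈ [r, r'] by simp))
      have hr' : r' < g := List.mem_range.1 (hs'.subset (show r' ∈ [r, r'] by simp))
      have hne : r ≠ r' := by
        have hp := List.Pairwise.sublist hs' List.pairwise_lt_range
        have : r < r' := by simpa using hp
        omega
      intro x hx hx'
      obtain ⟨t, ht, rfl⟩ := List.mem_map.1 hx
      obtain ⟨t', ht', hEq⟩ := List.mem_map.1 hx'
      exact hne (pv_cycle_inj n s r r' t t' hn hr hr'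
        (List.mem_range.1 ht) (List.mem_range.1 ht') hEq.symm).1
  have hsub : L ⊆ List.range n := by
    intro x hx
    rw [hL] at hx
    obtain ⟨r, _, hx⟩ := List.mem_flatMap.1 hx
    obtain ⟨t, _, rfl⟩ := List.mem_map.1 hx
    exact List.mem_range.2 (Nat.mod_lt _ hn)
  exact (hnodup.subperm hsub).perm_of_length_le (by rw [hlen, List.length_range])

-- the inner walk: after m steps from j0 the index is (j0 + m*s) % n and the total has
-- accumulated the contributions of the visited indices
theorem pv_inner (chars : List Char) (s : Nat) (m : Nat) :
    ∀ (j0 : Nat) (t0 : Int), j0 < chars.length →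
    (List.range m).foldl
      (fun (st : Nat × Int) _ =>
        ((st.1 + s) % chars.length,
          if PySem.List.pyGet? chars (st.1 : Int)
              = PySem.List.pyGet? chars (((st.1 + s) % chars.length : Nat) : Int) then
            st.2 + (PySem.Int.ofChars? [(PySem.List.pyGet? chars (st.1 : Int)).getD ' ']).getD 0
          else st.2))
      (j0, t0)
    = ((j0 + m * s) % chars.length,
       t0 + ((List.range m).map (fun t => pvF chars s ((j0 + t * s) % chars.length))).sum) := by
  induction m with
  | zero => intro j0 t0 hj; simp [Nat.mod_eq_of_lt hj]
  | succ m ih =>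
    intro j0 t0 hj
    rw [List.range_succ, List.foldl_append, ih j0 t0 hj, List.foldl_cons, List.foldl_nil,
      List.map_append]
    simp only [List.map_cons, List.map_nil, List.sum_append, List.sum_cons, List.sum_nil,
      add_zero, Prod.mk.injEq]
    constructor
    · rw [Nat.mod_add_mod]
      congr 1
      ring
    · simp only [pvF]
      split_ifs with hc
      · ring
      · ring

-- A's fold is the sum of the per-index contributions in index order
theorem pv_A_eq (input : String) (step : Int) (hn : 0 < input.toList.length) :
    solve_captcha input step
      = ((List.range input.toList.length).map
          (pvF input.toList ((PySem.Int.mod step (input.toList.length : Int)).toNat))).sum := by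
  unfold solve_captcha
  set chars := input.toList with hchars
  set s := (PySem.Int.mod step (chars.length : Int)).toNat with hs
  have hnpos : (0 : Int) < (chars.length : Int) := by exact_mod_cast hn
  rw [pv_foldl_if_add
    (fun (p : Int × Char) =>
      PySem.List.pyGet? chars (PySem.Int.mod (p.1 + step) (chars.length : Int)) = some p.2)
    (fun (p : Int × Char) => (PySem.Int.ofChars? [p.2]).getD 0), zero_add]
  congr 1
  apply List.ext_getElem
  · simp [PySem.List.length_enumerate]
  · intro i h1 h2
    have hi : i < chars.length := by simpa [PySem.List.length_enumerate] using h1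
    simp only [List.getElem_map, List.getElem_range]
    rw [PySem.List.getElem_enumerate]
    have hsint : (s : Int) = PySem.Int.mod step (chars.length : Int) := by
      rw [hs]; exact Int.toNat_of_nonneg (PySem.Int.mod_nonneg _ hnpos)
    have hmod : PySem.Int.mod ((0 + (i : Int)) + step) (chars.length : Int)
        = (((i + s) % chars.length : Nat) : Int) := by
      rw [PySem.Int.mod_eq_emod_of_pos hnpos]
      have hstep : (0 + (i : Int)) + step
          = ((i : Int) + step % (chars.length : Int))
            + (chars.length : Int) * (step / (chars.length : Int)) := by
        have := Int.mul_ediv_add_emod step (chars.length : Int); omega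
      rw [hstep, Int.add_mul_emod_self_left]
      have hik : (i : Int) + step % (chars.length : Int) = (((i + s) : Nat) : Int) := by
        have h2 : (s : Int) = step % (chars.length : Int) :=
          hsint.trans (PySem.Int.mod_eq_emod_of_pos hnpos)
        push_cast; omega
      rw [hik]
      norm_cast
    rw [hmod]
    have hlt : (i + s) % chars.length < chars.length := Nat.mod_lt _ hn
    simp only [pvF, PySem.List.pyGet?_natCast, List.getElem?_eq_getElem hlt,
      List.getElem?_eq_getElem hi, Option.getD_some, Option.some.injEq]
    by_cases heq : chars[i] = chars[(i + s) % chars.length]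
    · simp [heq]
    · rw [if_neg (fun h => heq h.symm), if_neg heq]

-- B's cycle walks compute the same sum, reordered along the cycles
theorem pv_B_eq (input : String) (step : Int) (hn : 0 < input.toList.length) :
    solve_captcha_alt input step
      = ((List.range input.toList.length).map
          (pvF input.toList ((PySem.Int.mod step (input.toList.length : Int)).toNat))).sum := by
  have hne : ¬ (input.toList.length = 0) := by omega
  simp only [solve_captcha_alt]
  rw [if_neg hne, pvGcdLoop_eq]
  set chars := input.toList with hchars
  set s := (PySem.Int.mod step (chars.length : Int)).toNat with hs
  set g := Nat.gcd chars.length s with hg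
  have hgn : g ∣ chars.length := Nat.gcd_dvd_left chars.length s
  have hgle : g ≤ chars.length := Nat.le_of_dvd hn hgn
  rw [pv_foldl_add_sum (List.range g)
    (fun r => ((List.range (chars.length / g)).map
      (fun t => pvF chars s ((r + t * s) % chars.length))).sum)
    _
    (fun a r hr => by
      rw [pv_inner chars s (chars.length / g) r a
        (lt_of_lt_of_le (List.mem_range.1 hr) hgle)])
    0, zero_add]
  have hperm := (pv_visit_perm chars.length s hn).map (pvF chars s)
  rw [← hperm.sum_eq, List.map_flatMap]
  rw [List.flatMap_def, List.sum_flatten, List.map_map]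
  rw [← hg]
  congr 1
  refine List.map_congr_left ?_
  intro r _
  simp [List.map_map, Function.comp_def]

-- ===== VERDICT (by name: the statement is the Claim_ definition above) =====

theorem solve_captcha_spec : Claim_equal_solve_captcha := by
  intro input step _ _
  unfold Spec_solve_captcha
  by_cases hnil : input.toList.length = 0
  · have h0 : input.toList = [] := List.eq_nil_iff_length_eq_zero.mpr hnil
    unfold solve_captcha solve_captcha_alt
    simp [h0]
  · rw [pv_A_eq input step (by omega), pv_B_eq input step (by omega)]
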